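-- pv_equiv track=rewrite | github.com/JaimeSJV/TFG_Jaime_San_Jos-_Villar | corrector/utils.py | esquinas
-- ===== SOURCE A (Python) =====
-- def esquinas(cont):
--     minX = cont[0]
--     minY = cont[0]
--     MaxX = minX
--     MaxY = minY
--     for o in cont:
--         if o[0][0] < minX[0][0]:
--             minX = o
--         if o[0][0] > MaxX[0][0]:
--             MaxX = o
--         if o[0][1] < minY[0][1]:
--             minY = o
--         if o[0][1] > MaxY[0][1]:
--             MaxY = o
--
--     return minX, minY, MaxX, MaxY
-- ===== SOURCE B (Python) =====
-- def esquinas(cont):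
--     minX = min(cont, key=lambda o: o[0][0])
--     minY = min(cont, key=lambda o: o[0][1])
--     MaxX = max(cont, key=lambda o: o[0][0])
--     MaxY = max(cont, key=lambda o: o[0][1])
--     return minX, minY, MaxX, MaxY
-- ===== Notes on version B (the rewrite author's own statement) =====
-- stated objective: idiomatic
-- what changed: Replaces the single fused loop maintaining four running extremes with four independent min/max library reductions keyed on o[0][0] / o[0][1]; tie-breaking (first extremal element) is preserved.
-- outside the precondition, e.g. on esquinas([]): A raises IndexError, B raises ValueError
import Mathlib
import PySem

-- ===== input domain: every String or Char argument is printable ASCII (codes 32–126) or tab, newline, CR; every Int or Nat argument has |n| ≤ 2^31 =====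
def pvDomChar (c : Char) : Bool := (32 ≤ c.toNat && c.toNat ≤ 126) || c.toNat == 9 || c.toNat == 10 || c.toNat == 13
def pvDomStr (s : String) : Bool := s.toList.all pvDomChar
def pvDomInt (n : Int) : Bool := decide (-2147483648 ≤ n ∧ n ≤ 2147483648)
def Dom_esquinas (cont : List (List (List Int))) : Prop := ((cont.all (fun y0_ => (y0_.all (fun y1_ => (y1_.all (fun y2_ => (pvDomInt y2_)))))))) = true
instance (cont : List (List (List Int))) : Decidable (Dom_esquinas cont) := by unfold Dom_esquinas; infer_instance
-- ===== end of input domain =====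

-- B replaces A's fused four-accumulator loop by four independent min/max reductions (idiomatic; same cost).

-- ===== PORT A =====
-- o[0][0] and o[0][1]; Pre_ guarantees the indices are in range, so pyGetD is exact there
def eaKX (o : List (List Int)) : Int := PySem.List.pyGetD (PySem.List.pyGetD o 0 []) 0 0
def eaKY (o : List (List Int)) : Int := PySem.List.pyGetD (PySem.List.pyGetD o 0 []) 1 0

def esquinas (cont : List (List (List Int))) : List (List Int) × List (List Int) × List (List Int) × List (List Int) :=
  let c0 := PySem.List.pyGetD cont 0 []   -- cont[0]; Pre_ gives cont ≠ []
  cont.foldl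
    (fun s o =>
      (if eaKX o < eaKX s.1 then o else s.1,
       if eaKY o < eaKY s.2.1 then o else s.2.1,
       if eaKX s.2.2.1 < eaKX o then o else s.2.2.1,
       if eaKY s.2.2.2 < eaKY o then o else s.2.2.2))
    (c0, c0, c0, c0)

-- ===== PORT B =====
def esquinas_alt (cont : List (List (List Int))) : List (List Int) × List (List Int) × List (List Int) × List (List Int) :=
  ((PySem.List.min? cont (fun o => PySem.List.pyGetD (PySem.List.pyGetD o 0 []) 0 0)).getD [],
   (PySem.List.min? cont (fun o => PySem.List.pyGetD (PySem.List.pyGetD o 0 []) 1 0)).getD [],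
   (PySem.List.max? cont (fun o => PySem.List.pyGetD (PySem.List.pyGetD o 0 []) 0 0)).getD [],
   (PySem.List.max? cont (fun o => PySem.List.pyGetD (PySem.List.pyGetD o 0 []) 1 0)).getD [])

-- ===== PRECONDITION & SPEC =====
-- Pre_ excludes exactly the inputs where Python A raises: empty cont (IndexError on cont[0]) and
-- any element o with o == [] or len(o[0]) < 2 (IndexError on o[0][0] / o[0][1]).
def Pre_esquinas (cont : List (List (List Int))) : Prop :=
  cont ≠ [] ∧ ∀ o ∈ cont, o ≠ [] ∧ 2 ≤ (o.headD []).length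
instance (cont : List (List (List Int))) : Decidable (Pre_esquinas cont) := by unfold Pre_esquinas; infer_instance

def pvWitness_esquinas : List (List (List Int)) := [[[1, 2]], [[0, 3]], [[2, 1]]]

def Spec_esquinas (cont : List (List (List Int))) (out : List (List Int) × List (List Int) × List (List Int) × List (List Int)) : Prop := out = esquinas_alt cont
instance (cont : List (List (List Int))) (out : List (List Int) × List (List Int) × List (List Int) × List (List Int)) : Decidable (Spec_esquinas cont out) := by unfold Spec_esquinas; infer_instance

-- ===== CLAIM (what is proved, stated in full; the proofs are below) =====
def Claim_equal_esquinas : Prop := ∀ (cont : List (List (List Int))), Dom_esquinas cont → Pre_esquinas cont → Spec_esquinas cont (esquinas cont)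

-- ===== LEMMAS AND PROOFS =====

-- min?/max? on a nonempty list are the plain first-extremal fold from the head
theorem min?_foldl_some {α : Type} (f : α → Int) (t : List α) (c : α) :
    t.foldl (fun acc x => match acc with
        | none => some x
        | some m => if f x < f m then some x else some m) (some c)
      = some (t.foldl (fun m o => if f o < f m then o else m) c) := by
  induction t generalizing c with
  | nil => rfl
  | cons x xs ih =>
      simp only [List.foldl_cons]
      by_cases h : f x < f c <;> simp only [h, if_true, if_false] <;> exact ih _

theorem min?_cons_foldl {α : Type} (f : α → Int) (c : α) (t : List α) :
    PySem.List.min? (c :: t) f = some (t.foldl (fun m o => if f o < f m then o else m) c) := by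
  simp only [PySem.List.min?, List.foldl_cons]
  exact min?_foldl_some f t c

theorem max?_foldl_some {α : Type} (f : α → Int) (t : List α) (c : α) :
    t.foldl (fun acc x => match acc with
        | none => some x
        | some m => if f m < f x then some x else some m) (some c)
      = some (t.foldl (fun m o => if f m < f o then o else m) c) := by
  induction t generalizing c with
  | nil => rfl
  | cons x xs ih =>
      simp only [List.foldl_cons]
      by_cases h : f c < f x <;> simp only [h, if_true, if_false] <;> exact ih _

theorem max?_cons_foldl {α : Type} (f : α → Int) (c : α) (t : List α) :
    PySem.List.max? (c :: t) f = some (t.foldl (fun m o => if f m < f o then o else m) c) := by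
  simp only [PySem.List.max?, List.foldl_cons]
  exact max?_foldl_some f t c

-- A's fold over the 4-tuple splits into four independent folds
theorem esq_fold_split (t : List (List (List Int)))
    (a b c d : List (List Int)) :
    t.foldl
      (fun s o =>
        (if eaKX o < eaKX s.1 then o else s.1,
         if eaKY o < eaKY s.2.1 then o else s.2.1,
         if eaKX s.2.2.1 < eaKX o then o else s.2.2.1,
         if eaKY s.2.2.2 < eaKY o then o else s.2.2.2))
      (a, b, c, d)
    = (t.foldl (fun m o => if eaKX o < eaKX m then o else m) a,
       t.foldl (fun m o => if eaKY o < eaKY m then o else m) b,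
       t.foldl (fun m o => if eaKX m < eaKX o then o else m) c,
       t.foldl (fun m o => if eaKY m < eaKY o then o else m) d) := by
  induction t generalizing a b c d with
  | nil => rfl
  | cons x xs ih => simp only [List.foldl_cons]; exact ih _ _ _ _

-- ===== VERDICT (by name: the statement is the Claim_ definition above) =====
theorem esquinas_spec : Claim_equal_esquinas := by
  intro cont _ hpre
  unfold Spec_esquinas
  obtain ⟨hne, -⟩ := hpre
  obtain ⟨c, t, rfl⟩ := List.exists_cons_of_ne_nil hne
  unfold esquinas
  have hc0 : PySem.List.pyGetD (c :: t) 0 ([] : List (List Int)) = c := by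
    simp [pysem]
  simp only [hc0, List.foldl_cons, lt_self_iff_false, if_false]
  rw [esq_fold_split]
  unfold esquinas_alt
  rw [min?_cons_foldl, min?_cons_foldl, max?_cons_foldl, max?_cons_foldl]
  rfl
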